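-- pv_equiv track=rewrite | github.com/SACGF/cdot | cdot/hgvs/gene_hgvs.py | _rank_transcripts_by_tags
-- ===== SOURCE A (Python) =====
-- from typing import Optional
--
-- def _rank_transcripts_by_tags(
--     tx_and_tags: list[tuple[str, list[str]]],
--     tag_priority: list[str],
-- ) -> list[tuple[str, list[str], Optional[str]]]:
--     """
--     Return [(tx_ac, tags, matched_tag_or_None), ...] sorted best-first.
--
--     Transcripts whose tags include an earlier entry in tag_priority sort first.
--     Transcripts with no matching priority tag sort last (preserving the
--     input order, which is longest-first from get_tx_ac_tags_for_gene).
--     """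
--     def sort_key(item: tuple[str, list[str]]) -> int:
--         _tx_ac, tags = item
--         for i, tag in enumerate(tag_priority):
--             if tag in tags:
--                 return i
--         return len(tag_priority)
--
--     ranked = sorted(tx_and_tags, key=sort_key)
--     result = []
--     for tx_ac, tags in ranked:
--         matched = next((t for t in tag_priority if t in tags), None)
--         result.append((tx_ac, tags, matched))
--     return result
-- ===== SOURCE B (Python) =====
-- from typing import Optional
--
--
-- def _rank_transcripts_by_tags(
--     tx_and_tags: list[tuple[str, list[str]]],
--     tag_priority: list[str],
-- ) -> list[tuple[str, list[str], Optional[str]]]: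
--     # Bucket by priority rank in one pass instead of sorting: buckets are
--     # filled in input order and emitted best-first, unmatched last, which
--     # reproduces the stable sort's ordering exactly.
--     n = len(tag_priority)
--     buckets = [[] for _ in range(n + 1)]
--     for tx_ac, tags in tx_and_tags:
--         rank = n
--         matched = None
--         for i, tag in enumerate(tag_priority):
--             if tag in tags:
--                 rank = i
--                 matched = tag
--                 break
--         buckets[rank].append((tx_ac, tags, matched))
--     out = []
--     for b in buckets:
--         out += b
--     return out
-- ===== Notes on version B (the rewrite author's own statement) =====
-- stated objective: alternative
-- what changed: Replaces the stable sort by priority key (plus a second matched-tag scan per item) with a single bucketing pass: each item's first matching priority tag and rank are computed once, the item is appended to the bucket of its rank, and the buckets are concatenated best-first with unmatched last.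
import Mathlib
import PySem

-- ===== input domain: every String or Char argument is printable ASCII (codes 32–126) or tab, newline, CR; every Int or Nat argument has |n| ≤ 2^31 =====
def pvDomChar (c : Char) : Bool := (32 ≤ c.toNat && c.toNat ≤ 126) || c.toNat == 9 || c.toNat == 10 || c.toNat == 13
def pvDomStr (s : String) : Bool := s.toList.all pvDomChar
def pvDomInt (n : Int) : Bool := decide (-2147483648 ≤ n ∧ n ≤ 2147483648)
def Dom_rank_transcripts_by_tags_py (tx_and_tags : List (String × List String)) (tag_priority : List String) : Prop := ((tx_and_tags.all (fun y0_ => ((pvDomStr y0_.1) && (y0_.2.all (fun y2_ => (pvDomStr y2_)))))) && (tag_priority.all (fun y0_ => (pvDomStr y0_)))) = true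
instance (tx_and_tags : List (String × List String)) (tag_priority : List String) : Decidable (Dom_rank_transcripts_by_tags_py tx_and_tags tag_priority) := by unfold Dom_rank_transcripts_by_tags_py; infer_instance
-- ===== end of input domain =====

-- B replaces the stable sort by priority key with a single bucketing pass
-- (one bucket per priority rank, unmatched last); same return value proved below.

-- ===== PORT A =====
-- sort_key's inner loop: 'for i, tag in enumerate(tag_priority): if tag in tags: return i' / 'return len(tag_priority)'
def sortKeyAuxA (tags : List String) : List String → Int → Int
  | [], i => i
  | t :: rest, i => if tags.contains t then i else sortKeyAuxA tags rest (i + 1)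

def sortKeyA (tag_priority tags : List String) : Int :=
  sortKeyAuxA tags tag_priority 0

-- 'next((t for t in tag_priority if t in tags), None)'
def nextMatchA (tags : List String) : List String → Option String
  | [] => none
  | t :: rest => if tags.contains t then some t else nextMatchA tags rest

def rank_transcripts_by_tags_py (tx_and_tags : List (String × List String)) (tag_priority : List String) : List (String × List String × Option String) :=
  let ranked := PySem.List.sorted tx_and_tags (fun item => sortKeyA tag_priority item.2)
  ranked.foldl (fun acc item => acc ++ [(item.1, item.2, nextMatchA item.2 tag_priority)]) []

-- ===== PORT B =====
-- 'for i, tag in enumerate(tag_priority): if tag in tags: rank, matched = i, tag; break' (default (n, None))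
def firstMatchAuxB (tags : List String) : List String → Nat → Nat × Option String
  | [], i => (i, none)
  | t :: rest, i => if tags.contains t then (i, some t) else firstMatchAuxB tags rest (i + 1)

def firstMatchB (tag_priority tags : List String) : Nat × Option String :=
  firstMatchAuxB tags tag_priority 0

-- 'buckets[rank].append(x)'
def appendAtB {α : Type} : List (List α) → Nat → α → List (List α)
  | [], _, _ => []
  | b :: rest, 0, x => (b ++ [x]) :: rest
  | b :: rest, Nat.succ k, x => b :: appendAtB rest k x

def rank_transcripts_by_tags_py_alt (tx_and_tags : List (String × List String)) (tag_priority : List String) : List (String × List String × Option String) :=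
  let n := tag_priority.length
  let buckets := tx_and_tags.foldl
    (fun bs item =>
      let fm := firstMatchB tag_priority item.2
      appendAtB bs fm.1 (item.1, item.2, fm.2))
    (List.replicate (n + 1) [])
  buckets.foldl (fun acc b => acc ++ b) []

-- ===== PRECONDITION & SPEC =====
def Spec_rank_transcripts_by_tags_py (tx_and_tags : List (String × List String)) (tag_priority : List String) (out : List (String × List String × Option String)) : Prop := out = rank_transcripts_by_tags_py_alt tx_and_tags tag_priority
instance (tx_and_tags : List (String × List String)) (tag_priority : List String) (out : List (String × List String × Option String)) : Decidable (Spec_rank_transcripts_by_tags_py tx_and_tags tag_priority out) := by unfold Spec_rank_transcripts_by_tags_py; infer_instance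

-- ===== CLAIM (what is proved, stated in full; the proofs are below) =====
def Claim_equal_rank_transcripts_by_tags_py : Prop := ∀ (tx_and_tags : List (String × List String)) (tag_priority : List String), Dom_rank_transcripts_by_tags_py tx_and_tags tag_priority → Spec_rank_transcripts_by_tags_py tx_and_tags tag_priority (rank_transcripts_by_tags_py tx_and_tags tag_priority)

-- ===== LEMMAS AND PROOFS =====

-- rank of an item (Nat) and its annotation, the shared vocabulary of the proof
def rkOf (tp : List String) (item : String × List String) : Nat :=
  (firstMatchB tp item.2).1

def annotOf (tp : List String) (item : String × List String) : String × List String × Option String :=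
  (item.1, item.2, (firstMatchB tp item.2).2)

-- the bucketed arrangement of xs (unannotated), buckets 0..n in order
def bucketsOf (tp : List String) (xs : List (String × List String)) : List (String × List String) :=
  (List.range (tp.length + 1)).flatMap (fun k => xs.filter (fun it => rkOf tp it == k))

lemma firstMatchAuxB_shift (tags tp : List String) (j : Nat) :
    firstMatchAuxB tags tp j = ((firstMatchAuxB tags tp 0).1 + j, (firstMatchAuxB tags tp 0).2) := by
  induction tp generalizing j with
  | nil => simp [firstMatchAuxB]
  | cons t rest ih =>
    by_cases h : t ∈ tags
    · simp [firstMatchAuxB, h]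
    · simp only [firstMatchAuxB]
      rw [if_neg (by simpa using h), if_neg (by simpa using h), ih (j + 1), ih 1]
      simp only [Prod.mk.injEq]
      exact ⟨by omega, trivial⟩

lemma sortKeyAuxA_eq (tags tp : List String) (i : Int) :
    sortKeyAuxA tags tp i = i + ((firstMatchAuxB tags tp 0).1 : Int) := by
  induction tp generalizing i with
  | nil => simp [sortKeyAuxA, firstMatchAuxB]
  | cons t rest ih =>
    by_cases h : t ∈ tags
    · simp [sortKeyAuxA, firstMatchAuxB, h]
    · simp only [sortKeyAuxA, firstMatchAuxB]
      rw [if_neg (by simpa using h), if_neg (by simpa using h), ih,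
        firstMatchAuxB_shift tags rest 1]
      push_cast
      ring

lemma sortKeyA_eq_rk (tp : List String) (item : String × List String) :
    sortKeyA tp item.2 = (rkOf tp item : Int) := by
  simp [sortKeyA, rkOf, firstMatchB, sortKeyAuxA_eq]

lemma nextMatchA_eq (tags tp : List String) :
    nextMatchA tags tp = (firstMatchAuxB tags tp 0).2 := by
  induction tp with
  | nil => simp [nextMatchA, firstMatchAuxB]
  | cons t rest ih =>
    by_cases h : t ∈ tags
    · simp [nextMatchA, firstMatchAuxB, h]
    · simp only [nextMatchA, firstMatchAuxB]
      rw [if_neg (by simpa using h), if_neg (by simpa using h), ih,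
        firstMatchAuxB_shift tags rest (0 + 1)]

lemma firstMatchAuxB_fst_le (tags tp : List String) (j : Nat) :
    (firstMatchAuxB tags tp j).1 ≤ tp.length + j := by
  induction tp generalizing j with
  | nil => simp [firstMatchAuxB]
  | cons t rest ih =>
    by_cases h : t ∈ tags
    · simp [firstMatchAuxB, h]
    · simp only [firstMatchAuxB, List.length_cons]
      rw [if_neg (by simpa using h)]
      have := ih (j + 1); omega

lemma rkOf_le (tp : List String) (item : String × List String) : rkOf tp item ≤ tp.length := by
  have := firstMatchAuxB_fst_le item.2 tp 0
  simpa [rkOf, firstMatchB] using this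

lemma insertBy_cons {α : Type} (before : α → α → Bool) (x y : α) (ys : List α) :
    PySem.List.insertBy before x (y :: ys)
      = if before x y then x :: y :: ys else y :: PySem.List.insertBy before x ys := by
  rw [PySem.List.insertBy]

lemma insertBy_append_left {α : Type} (before : α → α → Bool) (x : α) (l1 l2 : List α)
    (h : ∀ y ∈ l1, before x y = false) :
    PySem.List.insertBy before x (l1 ++ l2) = l1 ++ PySem.List.insertBy before x l2 := by
  induction l1 with
  | nil => simp
  | cons y l1' ih =>
    have hy : before x y = false := h y (by simp)
    rw [List.cons_append, insertBy_cons, hy]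
    simp only [Bool.false_eq_true, if_false, List.cons_append, List.cons.injEq, true_and]
    exact ih (fun a ha => h a (by simp [ha]))

lemma insertBy_all_before {α : Type} (before : α → α → Bool) (x : α) (l : List α)
    (h : ∀ y ∈ l, before x y = true) :
    PySem.List.insertBy before x l = x :: l := by
  cases l with
  | nil => rfl
  | cons z zs => rw [insertBy_cons, h z (by simp)]; simp

lemma mem_bucket_rk {tp : List String} {xs : List (String × List String)} {k : Nat}
    {y : String × List String} (hy : y ∈ xs.filter (fun it => rkOf tp it == k)) :
    rkOf tp y = k := by
  have := List.of_mem_filter hy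
  simpa using this

-- one insertion step: inserting x into the bucketed arrangement appends it to its bucket
lemma insertBy_bucketsOf (tp : List String) (pref : List (String × List String))
    (x : String × List String) :
    PySem.List.insertBy (fun a b => decide (sortKeyA tp a.2 < sortKeyA tp b.2)) x (bucketsOf tp pref)
      = bucketsOf tp (pref ++ [x]) := by
  have hrle : rkOf tp x ≤ tp.length := rkOf_le tp x
  have hsplit : tp.length + 1 = (rkOf tp x + 1) + (tp.length - rkOf tp x) := by omega
  have hb : ∀ (a b : String × List String),
      decide (sortKeyA tp a.2 < sortKeyA tp b.2) = decide (rkOf tp a < rkOf tp b) := by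
    intro a b
    simp [sortKeyA_eq_rk tp a, sortKeyA_eq_rk tp b]
  unfold bucketsOf
  rw [hsplit, List.range_add, List.flatMap_append, List.flatMap_append]
  set f := fun k => pref.filter (fun it => rkOf tp it == k) with hf
  set g := fun k => (pref ++ [x]).filter (fun it => rkOf tp it == k) with hg
  have hfg : ∀ k : Nat, g k = f k ++ (if rkOf tp x = k then [x] else []) := by
    intro k
    simp only [hg, hf, List.filter_append, List.filter_cons, List.filter_nil]
    by_cases h : rkOf tp x = k
    · simp [h]
    · simp [h]
  rw [insertBy_append_left]
  · rw [insertBy_all_before]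
    · have hlow : (List.range (rkOf tp x + 1)).flatMap g
          = (List.range (rkOf tp x + 1)).flatMap f ++ [x] := by
        rw [List.range_succ, List.flatMap_append, List.flatMap_append]
        have h1 : (List.range (rkOf tp x)).flatMap g = (List.range (rkOf tp x)).flatMap f := by
          apply List.flatMap_congr
          intro k hk
          rw [hfg k]
          have : rkOf tp x ≠ k := by have := List.mem_range.mp hk; omega
          simp [this]
        have h2 : ([rkOf tp x] : List Nat).flatMap g = ([rkOf tp x] : List Nat).flatMap f ++ [x] := by
          simp [hfg (rkOf tp x)]
        rw [h1, h2, List.append_assoc]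
      have hhigh : ((List.range (tp.length - rkOf tp x)).map (fun i => rkOf tp x + 1 + i)).flatMap g
          = ((List.range (tp.length - rkOf tp x)).map (fun i => rkOf tp x + 1 + i)).flatMap f := by
        apply List.flatMap_congr
        intro k hk
        rw [hfg k]
        have : rkOf tp x ≠ k := by
          rcases List.mem_map.mp hk with ⟨i, _, rfl⟩; omega
        simp [this]
      rw [hlow, hhigh, List.append_assoc]
      simp
    · intro y hy
      rcases List.mem_flatMap.mp hy with ⟨k, hk, hyk⟩
      rcases List.mem_map.mp hk with ⟨i, _, rfl⟩
      rw [hb]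
      have := mem_bucket_rk (tp := tp) hyk
      simp only [decide_eq_true_eq]
      omega
  · intro y hy
    rcases List.mem_flatMap.mp hy with ⟨k, hk, hyk⟩
    have hk' := List.mem_range.mp hk
    rw [hb]
    have := mem_bucket_rk (tp := tp) hyk
    simp only [decide_eq_false_iff_not]
    omega

lemma foldl_insertBy_bucketsOf (tp : List String) (xs pref : List (String × List String)) :
    xs.foldl (fun acc x =>
        PySem.List.insertBy (fun a b => decide (sortKeyA tp a.2 < sortKeyA tp b.2)) x acc)
      (bucketsOf tp pref) = bucketsOf tp (pref ++ xs) := by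
  induction xs generalizing pref with
  | nil => simp
  | cons x xs' ih =>
    simp only [List.foldl_cons]
    rw [insertBy_bucketsOf, ih]
    simp

lemma sorted_eq_bucketsOf (tp : List String) (xs : List (String × List String)) :
    PySem.List.sorted xs (fun item => sortKeyA tp item.2) = bucketsOf tp xs := by
  rw [PySem.List.sorted_eq_foldl_insertBy]
  have h0 : bucketsOf tp ([] : List (String × List String)) = [] := by
    simp [bucketsOf]
  rw [← h0, foldl_insertBy_bucketsOf]
  simp

-- A's result is the annotated bucketed arrangement
lemma portA_eq (tx : List (String × List String)) (tp : List String) :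
    rank_transcripts_by_tags_py tx tp = (bucketsOf tp tx).map (annotOf tp) := by
  rw [show rank_transcripts_by_tags_py tx tp
      = (PySem.List.sorted tx (fun item => sortKeyA tp item.2)).foldl
          (fun acc item => acc ++ [(item.1, item.2, nextMatchA item.2 tp)]) [] from rfl]
  rw [sorted_eq_bucketsOf]
  have h := PySem.List.foldl_append_singleton_eq_map
    (f := fun item : String × List String => (item.1, item.2, nextMatchA item.2 tp))
    (bucketsOf tp tx) []
  refine h.trans ?_
  simp only [List.nil_append]
  apply List.map_congr_left
  intro item _
  simp [annotOf, firstMatchB, nextMatchA_eq]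

-- the annotated buckets-as-lists view of B's loop state
def bucketListOf (tp : List String) (pref : List (String × List String)) :
    List (List (String × List String × Option String)) :=
  (List.range (tp.length + 1)).map
    (fun k => (pref.filter (fun it => rkOf tp it == k)).map (annotOf tp))

lemma appendAtB_length {α : Type} (bs : List (List α)) (r : Nat) (x : α) :
    (appendAtB bs r x).length = bs.length := by
  induction bs generalizing r with
  | nil => rfl
  | cons b rest ih => cases r <;> simp [appendAtB, ih]

lemma appendAtB_getElem {α : Type} (bs : List (List α)) (r : Nat) (x : α) (k : Nat)
    (h : k < bs.length) :
    (appendAtB bs r x)[k]'(by rw [appendAtB_length]; exact h)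
      = if k = r then bs[k] ++ [x] else bs[k] := by
  induction bs generalizing r k with
  | nil => simp at h
  | cons b rest ih =>
    cases r with
    | zero => cases k <;> simp [appendAtB]
    | succ r' =>
      cases k with
      | zero => simp [appendAtB]
      | succ k' => simpa [appendAtB] using ih r' k' (by simpa using h)

lemma appendAtB_bucketListOf (tp : List String) (pref : List (String × List String))
    (x : String × List String) :
    appendAtB (bucketListOf tp pref) (rkOf tp x) (annotOf tp x)
      = bucketListOf tp (pref ++ [x]) := by
  have hlen : (bucketListOf tp pref).length = tp.length + 1 := by
    simp [bucketListOf]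
  apply List.ext_getElem
  · rw [appendAtB_length]; simp [bucketListOf]
  · intro k h1 h2
    rw [appendAtB_getElem _ _ _ _ (by rw [hlen]; simpa [bucketListOf] using h2)]
    have hk : k < tp.length + 1 := by simpa [bucketListOf] using h2
    simp only [bucketListOf, List.getElem_map, List.getElem_range, List.filter_append,
      List.filter_cons, List.filter_nil, List.map_append]
    by_cases h : k = rkOf tp x
    · simp [h]
    · have : ¬ (rkOf tp x == k) = true := by simp [Ne.symm h]
      simp [h, this]

lemma foldl_appendAtB_bucketListOf (tp : List String) (xs pref : List (String × List String)) :
    xs.foldl (fun bs item =>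
        appendAtB bs (firstMatchB tp item.2).1 (item.1, item.2, (firstMatchB tp item.2).2))
      (bucketListOf tp pref) = bucketListOf tp (pref ++ xs) := by
  induction xs generalizing pref with
  | nil => simp
  | cons x xs' ih =>
    simp only [List.foldl_cons]
    have hx : appendAtB (bucketListOf tp pref) (firstMatchB tp x.2).1 (x.1, x.2, (firstMatchB tp x.2).2)
        = bucketListOf tp (pref ++ [x]) := by
      have := appendAtB_bucketListOf tp pref x
      simpa [rkOf, annotOf] using this
    rw [hx, ih]
    simp

lemma portB_eq (tx : List (String × List String)) (tp : List String) :
    rank_transcripts_by_tags_py_alt tx tp = (bucketsOf tp tx).map (annotOf tp) := by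
  unfold rank_transcripts_by_tags_py_alt
  have hinit : List.replicate (tp.length + 1) ([] : List (String × List String × Option String))
      = bucketListOf tp [] := by
    simp [bucketListOf, List.map_const']
  simp only
  rw [hinit, foldl_appendAtB_bucketListOf, PySem.List.foldl_append_eq_flatten]
  simp only [List.nil_append, bucketListOf, bucketsOf, List.nil_append]
  rw [List.map_flatMap, List.flatMap_def]

-- ===== VERDICT (by name: the statement is the Claim_ definition above) =====
theorem rank_transcripts_by_tags_py_spec : Claim_equal_rank_transcripts_by_tags_py := by
  intro tx tp _
  unfold Spec_rank_transcripts_by_tags_py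
  rw [portA_eq, portB_eq]
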